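-- pv_equiv track=rewrite | github.com/Alehaaaa/TKM | TheKeyMachine/widgets/timeline.py | get_frames_timerange
-- ===== SOURCE A (Python) =====
-- def get_frames_timerange(frames):
--     normalized_frames = []
--     for frame in frames or []:
--         try:
--             normalized_frames.append(int(frame))
--         except Exception:
--             continue
--     if not normalized_frames:
--         return None
--     return min(normalized_frames), max(normalized_frames)
-- ===== SOURCE B (Python) =====
-- def get_frames_timerange(frames):
--     lo = hi = None
--     for frame in frames or []:
--         try:
--             v = int(frame)
--         except Exception:
--             continue
--         if lo is None:
--             lo = hi = v
--         else:
--             lo = min(lo, v)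
--             hi = max(hi, v)
--     return None if lo is None else (lo, hi)
-- ===== Notes on version B (the rewrite author's own statement) =====
-- stated objective: simpler
-- what changed: B drops the intermediate normalized list entirely and maintains running (lo, hi) extremes in a single pass, instead of materializing a list and scanning it twice with min() and max().
import Mathlib
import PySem

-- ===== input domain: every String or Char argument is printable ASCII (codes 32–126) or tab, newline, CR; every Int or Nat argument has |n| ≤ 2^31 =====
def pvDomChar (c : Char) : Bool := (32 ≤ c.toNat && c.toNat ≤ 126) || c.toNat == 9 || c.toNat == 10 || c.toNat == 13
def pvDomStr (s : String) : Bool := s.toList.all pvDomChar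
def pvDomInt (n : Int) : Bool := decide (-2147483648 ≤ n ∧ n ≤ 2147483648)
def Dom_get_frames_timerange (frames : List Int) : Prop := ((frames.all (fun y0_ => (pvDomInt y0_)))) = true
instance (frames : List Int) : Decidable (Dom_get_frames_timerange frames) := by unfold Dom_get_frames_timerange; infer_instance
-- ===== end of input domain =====

-- B drops the intermediate normalized list and keeps running (lo, hi) extremes in one pass (objective: simpler).


-- ===== PORT A =====
-- int(frame) on an Int is the identity and never raises, so the try/except appends every element.
def get_frames_timerange (frames : List Int) : Option (Int × Int) :=
  let normalized := frames.foldl (fun acc f => acc ++ [f]) []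
  if normalized = [] then none
  else
    match PySem.List.min? normalized (fun y => y), PySem.List.max? normalized (fun y => y) with
    | some lo, some hi => some (lo, hi)
    | _, _ => none

-- ===== PORT B =====
def get_frames_timerange_alt (frames : List Int) : Option (Int × Int) :=
  frames.foldl (fun st v =>
    match st with
    | none => some (v, v)
    | some (lo, hi) => some (min lo v, max hi v)) none

-- ===== PRECONDITION & SPEC =====
def Spec_get_frames_timerange (frames : List Int) (out : Option (Int × Int)) : Prop := out = get_frames_timerange_alt frames
instance (frames : List Int) (out : Option (Int × Int)) : Decidable (Spec_get_frames_timerange frames out) := by unfold Spec_get_frames_timerange; infer_instance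

-- ===== CLAIM (what is proved, stated in full; the proofs are below) =====
def Claim_equal_get_frames_timerange : Prop := ∀ (frames : List Int), Dom_get_frames_timerange frames → Spec_get_frames_timerange frames (get_frames_timerange frames)

-- ===== LEMMAS AND PROOFS =====
theorem pv_foldl_append (frames acc : List Int) :
    frames.foldl (fun acc f => acc ++ [f]) acc = acc ++ frames := by
  induction frames generalizing acc with
  | nil => simp
  | cons x t ih => simp [List.foldl, ih]

theorem pv_alt_some (t : List Int) (lo hi : Int) :
    t.foldl (fun st v =>
      match st with
      | none => some (v, v)
      | some (lo, hi) => some (min lo v, max hi v)) (some (lo, hi))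
    = some (t.foldl min lo, t.foldl max hi) := by
  induction t generalizing lo hi with
  | nil => rfl
  | cons x t ih => simp [List.foldl, ih]

-- ===== VERDICT (by name: the statement is the Claim_ definition above) =====
theorem get_frames_timerange_spec : Claim_equal_get_frames_timerange := by
  intro frames _
  unfold Spec_get_frames_timerange get_frames_timerange get_frames_timerange_alt
  rw [pv_foldl_append]
  cases frames with
  | nil => rfl
  | cons x t =>
    simp only [List.nil_append, List.foldl, if_neg (List.cons_ne_nil x t),
      PySem.List.min?_id_cons, PySem.List.max?_id_cons, pv_alt_some]
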